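-- pv_equiv track=rewrite | github.com/aspectrr/fluid.sh | sdk/scripts/polish_sdk.py | generate_simplified_aliases
-- ===== SOURCE A (Python) =====
-- def simplify_type_name(verbose_name: str) -> str:
--     """Convert verbose TypedDict names to user-friendly aliases.
--
--     Examples:
--         VirshSandboxInternalRestCreateSandboxResponseDict -> CreateSandboxResponse
--         VirshSandboxInternalStoreSandboxDict -> Sandbox
--         InternalAnsibleJobDict -> AnsibleJob
--     """
--     name = verbose_name
--
--     # Remove Dict suffix first
--     if name.endswith("Dict"):
--         name = name[:-4]
--
--     # Remove common prefixes in order of specificity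
--     prefixes_to_remove = [
--         "VirshSandboxInternalRest",
--         "VirshSandboxInternalStore",
--         "VirshSandboxInternal",
--         "VirshSandbox",
--         "InternalRest",
--         "InternalApi",
--         "InternalStore",
--         "Internal",
--     ]
--
--     for prefix in prefixes_to_remove:
--         if name.startswith(prefix):
--             name = name[len(prefix) :]
--             break
--
--     # Handle edge cases where name might be empty or start with lowercase
--     if not name or not name[0].isupper():
--         # Fall back to a reasonable extraction
--         name = verbose_name.replace("Dict", "")
--
--     return name
--
-- def generate_simplified_aliases(models: dict) -> dict[str, str]:
--     """Generate a mapping from verbose TypedDict names to simplified aliases.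
--
--     Returns:
--         Dict mapping verbose_name -> simplified_name
--         Handles collisions by preferring longer/more specific model names,
--         since those are typically the ones used in API return types.
--     """
--     # Filter to only non-request, non-query, non-enum models (same as topological_sort_models)
--     filtered_models = {
--         name: info
--         for name, info in models.items()
--         if not name.endswith("Request")
--         and not name.endswith("Query")
--         and not is_enum_model(name, models)
--     }
--
--     # Get all model names to avoid collisions with existing exports
--     all_model_names = set(models.keys())
--
--     verbose_to_simple: dict[str, str] = {}
--     simple_to_verbose: dict[str, str] = {}  # Track collisions
--
--     # Sort by length descending, then alphabetically
--     # This ensures longer/more specific names (like VirshSandbox... or TmuxClient...)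
--     # get priority over shorter duplicates
--     sorted_names = sorted(filtered_models.keys(), key=lambda x: (-len(x), x))
--
--     for verbose_name in sorted_names:
--         verbose_dict_name = f"{verbose_name}Dict"
--         simple_name = simplify_type_name(verbose_dict_name)
--
--         # Skip if simple name collides with an existing model class name
--         if simple_name in all_model_names:
--             # Collision with model class - use "Dict" suffix to disambiguate
--             simple_name = f"{simple_name}Dict"
--
--         # Handle collisions between TypedDict aliases
--         if simple_name in simple_to_verbose:
--             # Collision detected - skip the shorter duplicate
--             continue
--
--         verbose_to_simple[verbose_dict_name] = simple_name
--         simple_to_verbose[simple_name] = verbose_dict_name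
--
--     return verbose_to_simple
--
-- def is_enum_model(model_name: str, models: dict) -> bool:
--     """Check if a model is an enum (has no fields and name ends with Status, Kind, State, etc.)."""
--     if model_name not in models:
--         return False
--     model_info = models[model_name]
--     # Enums typically have no fields or are explicitly marked
--     # Common enum suffixes in this codebase
--     enum_suffixes = ("Status", "Kind", "State", "Type")
--     return len(model_info.get("fields", [])) == 0 and any(
--         model_name.endswith(s) for s in enum_suffixes
--     )
-- ===== SOURCE B (Python) =====
-- def simplify_type_name(verbose_name: str) -> str:
--     """Convert verbose TypedDict names to user-friendly aliases."""
--     name = verbose_name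
--     if name.endswith("Dict"):
--         name = name[:-4]
--     prefixes_to_remove = [
--         "VirshSandboxInternalRest",
--         "VirshSandboxInternalStore",
--         "VirshSandboxInternal",
--         "VirshSandbox",
--         "InternalRest",
--         "InternalApi",
--         "InternalStore",
--         "Internal",
--     ]
--     for prefix in prefixes_to_remove:
--         if name.startswith(prefix):
--             name = name[len(prefix):]
--             break
--     if not name or not name[0].isupper():
--         name = verbose_name.replace("Dict", "")
--     return name
--
--
-- def is_enum_model(model_name: str, models: dict) -> bool:
--     if model_name not in models:
--         return False
--     model_info = models[model_name]
--     enum_suffixes = ("Status", "Kind", "State", "Type")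
--     return len(model_info.get("fields", [])) == 0 and any(
--         model_name.endswith(s) for s in enum_suffixes
--     )
--
--
-- def generate_simplified_aliases(models: dict) -> dict[str, str]:
--     """Single-pass index-then-reduce: for each final alias keep the best
--     (longest, then alphabetically smallest) verbose name, then emit the
--     winners sorted."""
--     all_model_names = set(models.keys())
--
--     def final_simple(verbose_name: str) -> str:
--         simple = simplify_type_name(f"{verbose_name}Dict")
--         if simple in all_model_names:
--             simple = f"{simple}Dict"
--         return simple
--
--     best: dict[str, str] = {}  # alias -> winning verbose model name
--     for name in models:
--         if (
--             name.endswith("Request")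
--             or name.endswith("Query")
--             or is_enum_model(name, models)
--         ):
--             continue
--         simple = final_simple(name)
--         cur = best.get(simple)
--         if cur is None or len(name) > len(cur) or (len(name) == len(cur) and name < cur):
--             best[simple] = name
--     winners = sorted(best.values(), key=lambda x: (-len(x), x))
--     return {f"{w}Dict": final_simple(w) for w in winners}
-- ===== Notes on version B (the rewrite author's own statement) =====
-- stated objective: alternative
-- what changed: Replaces A's sort-all-filtered-names-then-greedy-first-wins scan with a single indexing pass that keeps, per final alias, the best (longest, then alphabetically smallest) verbose name in a dict, sorting only the winners at the end.
import Mathlib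
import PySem

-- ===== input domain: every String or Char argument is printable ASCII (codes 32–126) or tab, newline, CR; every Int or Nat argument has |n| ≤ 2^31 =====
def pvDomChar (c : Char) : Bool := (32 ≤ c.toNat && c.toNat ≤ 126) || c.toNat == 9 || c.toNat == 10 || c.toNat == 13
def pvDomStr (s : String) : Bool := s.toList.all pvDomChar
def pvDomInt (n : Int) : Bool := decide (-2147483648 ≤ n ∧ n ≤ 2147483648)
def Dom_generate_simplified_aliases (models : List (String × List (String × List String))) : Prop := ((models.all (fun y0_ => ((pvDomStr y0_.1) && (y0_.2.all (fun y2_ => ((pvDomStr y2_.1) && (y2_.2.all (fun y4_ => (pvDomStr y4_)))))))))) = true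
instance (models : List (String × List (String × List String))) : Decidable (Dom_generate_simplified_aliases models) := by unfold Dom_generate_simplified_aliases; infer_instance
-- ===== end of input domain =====

-- B replaces A's sort-all-then-greedy-scan by a single indexing pass that keeps, per final alias,
-- the best (longest, then alphabetically smallest) model name, sorting only the winners (objective: alternative).

-- ===== PORT A =====
-- shared module helper (identical text in Source A and Source B)
def simplify_type_name (verbose_name : String) : String :=
  let name := verbose_name
  let name := if PySem.Str.endswith name "Dict" then PySem.Str.slice name none (some (-4)) else name
  let prefixes_to_remove : List String :=
    ["VirshSandboxInternalRest", "VirshSandboxInternalStore", "VirshSandboxInternal",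
     "VirshSandbox", "InternalRest", "InternalApi", "InternalStore", "Internal"]
  -- 'for prefix in …: if startswith: strip; break' = strip the first matching prefix, if any
  let name := match prefixes_to_remove.find? (fun p => PySem.Str.startswith name p) with
    | some p => PySem.Str.slice name (some (PySem.Str.len p)) none
    | none => name
  if name = "" || !(match PySem.Str.pyGet? name 0 with
                    | some c => PySem.Chars.isupper c
                    | none => false) then
    PySem.Str.replace verbose_name "Dict" ""
  else
    name

-- shared module helper (identical text in Source A and Source B)
def is_enum_model (model_name : String) (models : List (String × List (String × List String))) : Bool :=
  match (PySem.Dict.mk models).get? model_name with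
  | none => false
  | some model_info =>
    let enum_suffixes : List String := ["Status", "Kind", "State", "Type"]
    (((PySem.Dict.mk model_info).getD "fields" []).length == 0)
      && enum_suffixes.any (fun s => PySem.Str.endswith model_name s)

def generate_simplified_aliases (models : List (String × List (String × List String))) : List (String × String) :=
  -- dict comprehension over models.items(); a Python dict's keys are unique (Pre_), so it is the filtered item list
  let filtered_models := models.filter (fun p =>
    !(PySem.Str.endswith p.1 "Request") && !(PySem.Str.endswith p.1 "Query")
      && !(is_enum_model p.1 models))
  let all_model_names : PySem.Set String := PySem.Set.ofList (models.map Prod.fst)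
  let sorted_names := PySem.List.sorted2 (filtered_models.map Prod.fst)
      (fun x => -(PySem.Str.len x)) (fun x => x)
  let final := sorted_names.foldl
    (fun (st : PySem.Dict String String × PySem.Dict String String) verbose_name =>
      let verbose_dict_name := verbose_name ++ "Dict"
      let simple_name := simplify_type_name verbose_dict_name
      let simple_name := if PySem.Set.contains all_model_names simple_name then simple_name ++ "Dict" else simple_name
      if PySem.Dict.contains st.2 simple_name then st
      else (st.1.insert verbose_dict_name simple_name, st.2.insert simple_name verbose_dict_name))
    (PySem.Dict.empty, PySem.Dict.empty)
  final.1.items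

-- ===== PORT B =====
-- Source B's nested helper final_simple (closure over all_model_names)
def final_simple (all_model_names : PySem.Set String) (verbose_name : String) : String :=
  let simple := simplify_type_name (verbose_name ++ "Dict")
  if PySem.Set.contains all_model_names simple then simple ++ "Dict" else simple

def generate_simplified_aliases_alt (models : List (String × List (String × List String))) : List (String × String) :=
  let all_model_names : PySem.Set String := PySem.Set.ofList (models.map Prod.fst)
  let best := (models.map Prod.fst).foldl
    (fun (best : PySem.Dict String String) name =>
      if PySem.Str.endswith name "Request" || PySem.Str.endswith name "Query"
          || is_enum_model name models then best
      else
        let simple := final_simple all_model_names name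
        match best.get? simple with
        | none => best.insert simple name
        | some cur =>
          if PySem.Str.len name > PySem.Str.len cur
              || (PySem.Str.len name == PySem.Str.len cur && decide (name < cur)) then
            best.insert simple name
          else best)
    PySem.Dict.empty
  let winners := PySem.List.sorted2 best.values (fun x => -(PySem.Str.len x)) (fun x => x)
  (winners.foldl (fun (d : PySem.Dict String String) w =>
      d.insert (w ++ "Dict") (final_simple all_model_names w)) PySem.Dict.empty).items

-- ===== PRECONDITION & SPEC =====
-- models is a Python dict, so its keys are distinct; association lists with duplicate
-- keys represent no Python input and are excluded.
def Pre_generate_simplified_aliases (models : List (String × List (String × List String))) : Prop :=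
  (models.map Prod.fst).Nodup
instance (models : List (String × List (String × List String))) : Decidable (Pre_generate_simplified_aliases models) := by unfold Pre_generate_simplified_aliases; infer_instance

def pvWitness_generate_simplified_aliases : (List (String × List (String × List String))) :=
  [("InternalAnsibleJob", [("fields", ["id"])]), ("JobStatus", [("fields", [])])]

def Spec_generate_simplified_aliases (models : List (String × List (String × List String))) (out : List (String × String)) : Prop := out = generate_simplified_aliases_alt models
instance (models : List (String × List (String × List String))) (out : List (String × String)) : Decidable (Spec_generate_simplified_aliases models out) := by unfold Spec_generate_simplified_aliases; infer_instance

-- ===== CLAIM (what is proved, stated in full; the proofs are below) =====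
def Claim_equal_generate_simplified_aliases : Prop := ∀ (models : List (String × List (String × List String))), Dom_generate_simplified_aliases models → Pre_generate_simplified_aliases models → Spec_generate_simplified_aliases models (generate_simplified_aliases models)

-- ===== LEMMAS AND PROOFS =====

def pvKf (s : String) : Lex (Int × String) := toLex (-(PySem.Str.len s), s)

theorem pvKf_inj : Function.Injective pvKf := by
  intro a b h
  have := congrArg (fun x => (ofLex x).2) h
  simpa [pvKf] using this

theorem pvKf_lt_iff (a b : String) :
    pvKf a < pvKf b ↔ (-(PySem.Str.len a) < -(PySem.Str.len b)
      ∨ (-(PySem.Str.len a) = -(PySem.Str.len b) ∧ a < b)) := by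
  rw [pvKf, pvKf, Prod.Lex.lt_iff]
  simp

theorem pv_append_dict_inj (a b : String) (h : a ++ "Dict" = b ++ "Dict") : a = b := by
  have h2 := congrArg String.toList h
  simp only [String.toList_append, List.append_cancel_right_eq] at h2
  exact String.toList_inj.mp h2

theorem pv_sorted2_eq (xs : List String) :
    PySem.List.sorted2 xs (fun x => -(PySem.Str.len x)) (fun x => x) = PySem.List.sorted xs pvKf := by
  rw [PySem.List.sorted_eq_foldl_insertBy]
  have hb : (fun a b : String => decide (-(PySem.Str.len a) < -(PySem.Str.len b))
        || (!decide (-(PySem.Str.len b) < -(PySem.Str.len a)) && decide (a < b)))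
      = fun a b => decide (pvKf a < pvKf b) := by
    funext a b
    rw [Bool.eq_iff_iff]
    simp only [Bool.or_eq_true, Bool.and_eq_true, Bool.not_eq_true', decide_eq_true_eq,
      decide_eq_false_iff_not, pvKf_lt_iff]
    constructor
    · rintro (h | ⟨h1, h2⟩)
      · exact Or.inl h
      · by_cases he : -(PySem.Str.len a) = -(PySem.Str.len b)
        · exact Or.inr ⟨he, h2⟩
        · exact Or.inl (by omega)
    · rintro (h | ⟨h1, h2⟩)
      · exact Or.inl h
      · exact Or.inr ⟨by omega, h2⟩
  show List.foldl (fun acc x => PySem.List.insertBy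
      (fun a b : String => decide (-(PySem.Str.len a) < -(PySem.Str.len b))
        || (!decide (-(PySem.Str.len b) < -(PySem.Str.len a)) && decide (a < b))) x acc) [] xs = _
  rw [hb]

def pvGreedyW (key : String → String) : List String → List String → List String
  | [], _ => []
  | v :: S, seen => if key v ∈ seen then pvGreedyW key S seen else v :: pvGreedyW key S (key v :: seen)

theorem pvGreedyW_sublist (key : String → String) (S seen : List String) :
    (pvGreedyW key S seen).Sublist S := by
  induction S generalizing seen with
  | nil => simp [pvGreedyW]
  | cons v S ih =>
    rw [pvGreedyW]
    split
    · exact (ih seen).cons v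
    · exact (ih (key v :: seen)).cons₂ v

theorem pvGreedyW_mem (key : String → String) (S : List String)
    (hp : S.Pairwise (fun a b => pvKf a < pvKf b)) (seen : List String) (v : String) :
    v ∈ pvGreedyW key S seen ↔
      v ∈ S ∧ key v ∉ seen ∧ ∀ u ∈ S, key u = key v → pvKf v ≤ pvKf u := by
  induction S generalizing seen with
  | nil => simp [pvGreedyW]
  | cons w S ih =>
    have hw : ∀ u ∈ S, pvKf w < pvKf u := fun u hu => (List.pairwise_cons.mp hp).1 u hu
    have hp' : S.Pairwise (fun a b => pvKf a < pvKf b) := (List.pairwise_cons.mp hp).2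
    have hwS : w ∉ S := fun h => lt_irrefl _ (hw w h)
    rw [pvGreedyW]
    split
    · rename_i hin
      rw [ih hp' seen]
      constructor
      · rintro ⟨hvS, hns, hmin⟩
        refine ⟨List.mem_cons_of_mem _ hvS, hns, ?_⟩
        intro u hu hk
        rcases List.mem_cons.mp hu with rfl | hu
        · exact absurd hk.symm (fun h => hns (h ▸ hin))
        · exact hmin u hu hk
      · rintro ⟨hvS, hns, hmin⟩
        rcases List.mem_cons.mp hvS with rfl | hvS
        · exact absurd hin hns
        · refine ⟨hvS, hns, fun u hu hk => hmin u (List.mem_cons_of_mem _ hu) hk⟩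
    · rename_i hin
      constructor
      · intro hmem
        rcases List.mem_cons.mp hmem with rfl | hmem
        · refine ⟨List.mem_cons_self, hin, ?_⟩
          intro u hu hk
          rcases List.mem_cons.mp hu with rfl | hu
          · exact le_refl _
          · exact le_of_lt (hw u hu)
        · obtain ⟨hvS, hns, hmin⟩ := (ih hp' (key w :: seen)).mp hmem
          have hkn : key v ≠ key w := fun h => hns (List.mem_cons.mpr (Or.inl h))
          refine ⟨List.mem_cons_of_mem _ hvS, fun h => hns (List.mem_cons_of_mem _ h), ?_⟩
          intro u hu hk
          rcases List.mem_cons.mp hu with rfl | hu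
          · exact absurd hk.symm hkn
          · exact hmin u hu hk
      · rintro ⟨hvS, hns, hmin⟩
        rcases List.mem_cons.mp hvS with rfl | hvS
        · exact List.mem_cons_self
        · refine List.mem_cons_of_mem _ ((ih hp' (key w :: seen)).mpr ⟨hvS, ?_, fun u hu hk => hmin u (List.mem_cons_of_mem _ hu) hk⟩)
          intro h
          rcases List.mem_cons.mp h with hk | hk
          · have := hmin w List.mem_cons_self hk.symm
            exact absurd (hw v hvS) (not_lt.mpr this)
          · exact hns hk

theorem pv_greedyA (key : String → String) (S : List String)
    (d e : PySem.Dict String String) (seen : List String)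
    (hS : S.Nodup) (hd : ∀ v ∈ S, d.contains (v ++ "Dict") = false)
    (he : ∀ k, e.contains k = true ↔ k ∈ seen) :
    (S.foldl (fun (st : PySem.Dict String String × PySem.Dict String String) v =>
        if PySem.Dict.contains st.2 (key v) then st
        else (st.1.insert (v ++ "Dict") (key v), st.2.insert (key v) (v ++ "Dict"))) (d, e)).1.items
      = d.items ++ (pvGreedyW key S seen).map (fun v => (v ++ "Dict", key v)) := by
  induction S generalizing d e seen with
  | nil => simp [pvGreedyW]
  | cons v S ih =>
    have hvS : v ∉ S := (List.nodup_cons.mp hS).1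
    have hS' : S.Nodup := (List.nodup_cons.mp hS).2
    rw [List.foldl_cons, pvGreedyW]
    by_cases hin : e.contains (key v) = true
    · rw [if_pos hin, if_pos ((he _).mp hin)]
      exact ih d e seen hS' (fun u hu => hd u (List.mem_cons_of_mem _ hu)) he
    · rw [if_neg hin, if_neg (fun h => hin ((he _).mpr h))]
      have hfree : d.contains (v ++ "Dict") = false := hd v List.mem_cons_self
      have hstep := ih (d.insert (v ++ "Dict") (key v)) (e.insert (key v) (v ++ "Dict"))
        (key v :: seen) hS'
        (by
          intro u hu
          rw [PySem.Dict.contains_insert]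
          have hne : u ≠ v := fun h => hvS (h ▸ hu)
          have : (u ++ "Dict" == v ++ "Dict") = false := by
            simp only [beq_eq_false_iff_ne, ne_eq]
            exact fun h => hne (pv_append_dict_inj _ _ h)
          rw [this, hd u (List.mem_cons_of_mem _ hu)]
          rfl)
        (by
          intro k
          rw [PySem.Dict.contains_insert]
          simp only [Bool.or_eq_true, beq_iff_eq, he k, List.mem_cons])
      rw [hstep, PySem.Dict.items_insert_of_not_contains _ _ hfree]
      simp [List.map_cons]

def pvUpd (key : String → String) (best : PySem.Dict String String) (name : String) : PySem.Dict String String :=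
  match best.get? (key name) with
  | none => best.insert (key name) name
  | some cur =>
    if PySem.Str.len name > PySem.Str.len cur
        || (PySem.Str.len name == PySem.Str.len cur && decide (name < cur)) then
      best.insert (key name) name
    else best

theorem pv_better_iff (a b : String) :
    (PySem.Str.len a > PySem.Str.len b
      || (PySem.Str.len a == PySem.Str.len b && decide (a < b))) = true ↔ pvKf a < pvKf b := by
  rw [pvKf_lt_iff]
  simp only [Bool.or_eq_true, Bool.and_eq_true, beq_iff_eq, decide_eq_true_eq, gt_iff_lt]
  constructor
  · rintro (h | ⟨h1, h2⟩)
    · exact Or.inl (by omega)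
    · exact Or.inr ⟨by omega, h2⟩
  · rintro (h | ⟨h1, h2⟩)
    · exact Or.inl (by omega)
    · exact Or.inr ⟨by omega, h2⟩

theorem pv_exists_min (l : List String) (hne : l ≠ []) :
    ∃ m ∈ l, ∀ u ∈ l, pvKf m ≤ pvKf u := by
  induction l with
  | nil => exact absurd rfl hne
  | cons a t ih =>
    by_cases ht : t = []
    · subst ht; exact ⟨a, List.mem_cons_self, by simp⟩
    · obtain ⟨m, hm, hmin⟩ := ih ht
      by_cases h : pvKf a ≤ pvKf m
      · refine ⟨a, List.mem_cons_self, ?_⟩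
        intro u hu
        rcases List.mem_cons.mp hu with rfl | hu
        · exact le_refl _
        · exact le_trans h (hmin u hu)
      · refine ⟨m, List.mem_cons_of_mem _ hm, ?_⟩
        intro u hu
        rcases List.mem_cons.mp hu with rfl | hu
        · exact le_of_not_ge h
        · exact hmin u hu

theorem pv_best_nodup_keys (key : String → String) (F : List String) :
    ((F.foldl (pvUpd key) PySem.Dict.empty)).keys.Nodup := by
  suffices h : ∀ d : PySem.Dict String String, d.keys.Nodup → (F.foldl (pvUpd key) d).keys.Nodup from
    h _ PySem.Dict.nodup_keys_empty
  induction F with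
  | nil => exact fun d hd => hd
  | cons a t ih =>
    intro d hd
    rw [List.foldl_cons]
    refine ih _ ?_
    rw [pvUpd]
    split
    · exact PySem.Dict.nodup_keys_insert _ _ _ hd
    · split
      · exact PySem.Dict.nodup_keys_insert _ _ _ hd
      · exact hd

theorem pv_best_get? (key : String → String) (F : List String) (hF : F.Nodup) (k : String) (v : String) :
    (F.foldl (pvUpd key) PySem.Dict.empty).get? k = some v ↔
      (v ∈ F ∧ key v = k ∧ ∀ u ∈ F, key u = k → pvKf v ≤ pvKf u) := by
  induction F using List.reverseRecOn generalizing k v with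
  | nil => simp [PySem.Dict.get?_empty]
  | append_singleton F w ih =>
    have hF' : F.Nodup := (List.nodup_append.mp hF).1
    have hext : ∀ k v, key w ≠ k →
        ((v ∈ F ∧ key v = k ∧ ∀ u ∈ F, key u = k → pvKf v ≤ pvKf u) ↔
         (v ∈ F ++ [w] ∧ key v = k ∧ ∀ u ∈ F ++ [w], key u = k → pvKf v ≤ pvKf u)) := by
      intro k v hkw
      constructor
      · rintro ⟨h1, h2, h3⟩
        refine ⟨List.mem_append_left _ h1, h2, ?_⟩
        intro u hu hk
        rcases List.mem_append.mp hu with hu | hu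
        · exact h3 u hu hk
        · rw [List.mem_singleton.mp hu] at hk
          exact absurd hk hkw
      · rintro ⟨h1, h2, h3⟩
        rcases List.mem_append.mp h1 with h1 | h1
        · exact ⟨h1, h2, fun u hu hk => h3 u (List.mem_append_left _ hu) hk⟩
        · rw [List.mem_singleton.mp h1] at h2
          exact absurd h2 hkw
    rw [List.foldl_append, List.foldl_cons, List.foldl_nil, pvUpd]
    split
    · rename_i hget
      -- no previous element with this alias: F's class of (key w) is empty
      have hclass : ∀ u ∈ F, key u ≠ key w := by
        intro u hu hk
        have hucls : u ∈ F.filter (fun x => decide (key x = key w)) :=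
          List.mem_filter.mpr ⟨hu, by simp [hk]⟩
        obtain ⟨m, hm, hmin⟩ := pv_exists_min _ (List.ne_nil_of_mem hucls)
        have hmF := List.mem_filter.mp hm
        have : (F.foldl (pvUpd key) PySem.Dict.empty).get? (key w) = some m := by
          refine (ih hF' (key w) m).mpr ⟨hmF.1, by simpa using hmF.2, ?_⟩
          intro u' hu' hk'
          exact hmin u' (List.mem_filter.mpr ⟨hu', by simp [hk']⟩)
        rw [hget] at this
        cases this
      by_cases hk : k = key w
      · subst hk
        rw [PySem.Dict.get?_insert_self]
        simp only [Option.some.injEq]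
        constructor
        · rintro rfl
          refine ⟨List.mem_append_right _ List.mem_cons_self, rfl, ?_⟩
          intro u hu hk
          rcases List.mem_append.mp hu with hu | hu
          · exact absurd hk (hclass u hu)
          · rw [List.mem_singleton.mp hu]
        · rintro ⟨h1, h2, _⟩
          rcases List.mem_append.mp h1 with h1 | h1
          · exact absurd h2 (hclass v h1)
          · exact (List.mem_singleton.mp h1).symm
      · rw [PySem.Dict.get?_insert_of_ne _ _ hk, ih hF' k v]
        exact hext k v (fun h => hk (h.symm))
    · rename_i cur hget
      have hcur := (ih hF' (key w) cur).mp hget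
      split
      · rename_i hbet
        have hlt : pvKf w < pvKf cur := (pv_better_iff w cur).mp hbet
        by_cases hk : k = key w
        · subst hk
          rw [PySem.Dict.get?_insert_self]
          simp only [Option.some.injEq]
          constructor
          · rintro rfl
            refine ⟨List.mem_append_right _ List.mem_cons_self, rfl, ?_⟩
            intro u hu hk
            rcases List.mem_append.mp hu with hu | hu
            · exact le_of_lt (lt_of_lt_of_le hlt (hcur.2.2 u hu hk))
            · rw [List.mem_singleton.mp hu]
          · rintro ⟨h1, h2, h3⟩
            rcases List.mem_append.mp h1 with h1 | h1
            · have hvw : pvKf v ≤ pvKf w :=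
                h3 w (List.mem_append_right _ List.mem_cons_self) rfl
              have hcv : pvKf cur ≤ pvKf v := hcur.2.2 v h1 h2
              exact absurd (lt_of_lt_of_le hlt (le_trans hcv hvw)) (lt_irrefl _)
            · exact (List.mem_singleton.mp h1).symm
        · rw [PySem.Dict.get?_insert_of_ne _ _ hk, ih hF' k v]
          exact hext k v (fun h => hk (h.symm))
      · rename_i hbet
        have hle : pvKf cur ≤ pvKf w := le_of_not_gt ((pv_better_iff w cur).not.mp hbet)
        by_cases hk : k = key w
        · subst hk
          rw [hget]
          simp only [Option.some.injEq]
          constructor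
          · rintro rfl
            refine ⟨List.mem_append_left _ hcur.1, hcur.2.1, ?_⟩
            intro u hu hk
            rcases List.mem_append.mp hu with hu | hu
            · exact hcur.2.2 u hu hk
            · rw [List.mem_singleton.mp hu]; exact hle
          · rintro ⟨h1, h2, h3⟩
            rcases List.mem_append.mp h1 with h1 | h1
            · have h4 : pvKf v ≤ pvKf cur :=
                h3 cur (List.mem_append_left _ hcur.1) hcur.2.1
              have h5 : pvKf cur ≤ pvKf v := hcur.2.2 v h1 h2
              exact pvKf_inj (le_antisymm h5 h4)
            · rw [List.mem_singleton.mp h1] at h3 ⊢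
              have h4 : pvKf w ≤ pvKf cur :=
                h3 cur (List.mem_append_left _ hcur.1) hcur.2.1
              exact pvKf_inj (le_antisymm hle h4)
        · rw [ih hF' k v]
          exact hext k v (fun h => hk (h.symm))

theorem pv_foldl_skip {α β : Type} (p : β → Bool) (f : α → β → α) (l : List β) (i : α) :
    l.foldl (fun acc x => if p x then acc else f acc x) i
      = (l.filter (fun x => !p x)).foldl f i := by
  induction l generalizing i with
  | nil => rfl
  | cons a t ih =>
    by_cases h : p a
    · simp [h, ih]
    · simp [h, ih]

theorem pv_map_fst_filter {α β : Type} (q : α → Bool) (l : List (α × β)) :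
    (l.filter (fun p => q p.1)).map Prod.fst = (l.map Prod.fst).filter q := by
  induction l with
  | nil => rfl
  | cons a t ih =>
    by_cases h : q a.1
    · simp [h, ih]
    · simp [h, ih]

theorem pv_values_eq (d : PySem.Dict String String) : d.values = d.items.map Prod.snd := rfl

theorem pv_keys_eq (d : PySem.Dict String String) : d.keys = d.items.map Prod.fst := rfl

theorem pv_values_iff (key : String → String) (F : List String) (hF : F.Nodup) (v : String) :
    v ∈ (F.foldl (pvUpd key) PySem.Dict.empty).values ↔
      (v ∈ F ∧ ∀ u ∈ F, key u = key v → pvKf v ≤ pvKf u) := by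
  have hnd := pv_best_nodup_keys key F
  rw [pv_values_eq, List.mem_map]
  constructor
  · rintro ⟨⟨k0, v0⟩, hp, rfl⟩
    have hg : (F.foldl (pvUpd key) PySem.Dict.empty).get? k0 = some v0 :=
      PySem.Dict.get?_of_mem_items _ hp hnd
    obtain ⟨h1, h2, h3⟩ := (pv_best_get? key F hF k0 v0).mp hg
    exact ⟨h1, fun u hu hk => h3 u hu (h2 ▸ hk)⟩
  · rintro ⟨h1, h2⟩
    have hg : (F.foldl (pvUpd key) PySem.Dict.empty).get? (key v) = some v :=
      (pv_best_get? key F hF (key v) v).mpr ⟨h1, rfl, h2⟩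
    exact ⟨(key v, v), PySem.Dict.mem_items_of_get?_eq_some _ hg, rfl⟩

theorem pv_values_nodup (key : String → String) (F : List String) (hF : F.Nodup) :
    (F.foldl (pvUpd key) PySem.Dict.empty).values.Nodup := by
  have hnd := pv_best_nodup_keys key F
  have hinv : ∀ p ∈ (F.foldl (pvUpd key) PySem.Dict.empty).items, p.1 = key p.2 := by
    rintro ⟨k0, v0⟩ hp
    have hg : (F.foldl (pvUpd key) PySem.Dict.empty).get? k0 = some v0 :=
      PySem.Dict.get?_of_mem_items _ hp hnd
    exact ((pv_best_get? key F hF k0 v0).mp hg).2.1.symm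
  rw [pv_keys_eq] at hnd
  rw [pv_values_eq]
  have : (F.foldl (pvUpd key) PySem.Dict.empty).items.map Prod.fst
      = ((F.foldl (pvUpd key) PySem.Dict.empty).items.map Prod.snd).map key := by
    rw [List.map_map]
    exact List.map_congr_left hinv
  rw [this] at hnd
  exact List.Nodup.of_map _ hnd

-- ===== VERDICT (by name: the statement is the Claim_ definition above) =====
theorem generate_simplified_aliases_spec : Claim_equal_generate_simplified_aliases := by
  intro models _dom hpre
  unfold Spec_generate_simplified_aliases
  set key : String → String := final_simple (PySem.Set.ofList (models.map Prod.fst)) with hkey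
  set F : List String := (models.map Prod.fst).filter
    (fun n => !(PySem.Str.endswith n "Request") && !(PySem.Str.endswith n "Query")
      && !(is_enum_model n models)) with hF
  set S : List String := PySem.List.sorted F pvKf with hS
  have hFnd : F.Nodup := hpre.filter _
  have hSnd : S.Nodup := ((PySem.List.sorted_perm F pvKf false).nodup_iff).mpr hFnd
  have hSpw : S.Pairwise (fun a b => pvKf a < pvKf b) := by
    have h1 := PySem.List.sorted_pairwise F pvKf
    have h2 : S.Pairwise (fun a b => a ≠ b) := hSnd
    exact (h1.and h2).imp (fun h => lt_of_le_of_ne h.1 (fun he => h.2 (pvKf_inj he)))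
  have hA : generate_simplified_aliases models
      = (pvGreedyW key S []).map (fun v => (v ++ "Dict", key v)) := by
    show ((PySem.List.sorted2 ((models.filter (fun p =>
          !(PySem.Str.endswith p.1 "Request") && !(PySem.Str.endswith p.1 "Query")
            && !(is_enum_model p.1 models))).map Prod.fst)
          (fun x => -(PySem.Str.len x)) (fun x => x)).foldl
        (fun (st : PySem.Dict String String × PySem.Dict String String) v =>
          if PySem.Dict.contains st.2 (key v) then st
          else (st.1.insert (v ++ "Dict") (key v), st.2.insert (key v) (v ++ "Dict")))
        (PySem.Dict.empty, PySem.Dict.empty)).1.items = _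
    rw [pv_map_fst_filter (fun n => !(PySem.Str.endswith n "Request")
        && !(PySem.Str.endswith n "Query") && !(is_enum_model n models)) models,
      pv_sorted2_eq]
    have := pv_greedyA key S PySem.Dict.empty PySem.Dict.empty [] hSnd
      (fun v _ => PySem.Dict.contains_empty _)
      (by intro k; simp [PySem.Dict.contains_empty])
    rw [hS] at this
    simpa using this
  have hB : generate_simplified_aliases_alt models
      = ((PySem.List.sorted ((F.foldl (pvUpd key) PySem.Dict.empty).values) pvKf).foldl
          (fun (d : PySem.Dict String String) w => d.insert (w ++ "Dict") (key w))
          PySem.Dict.empty).items := by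
    show ((PySem.List.sorted2 (((models.map Prod.fst).foldl
        (fun (best : PySem.Dict String String) name =>
          if PySem.Str.endswith name "Request" || PySem.Str.endswith name "Query"
              || is_enum_model name models then best
          else pvUpd key best name)
        PySem.Dict.empty).values) (fun x => -(PySem.Str.len x)) (fun x => x)).foldl
        (fun (d : PySem.Dict String String) w => d.insert (w ++ "Dict") (key w))
        PySem.Dict.empty).items = _
    rw [pv_foldl_skip, pv_sorted2_eq]
    have hpred : ((models.map Prod.fst).filter
        (fun n => !(PySem.Str.endswith n "Request" || PySem.Str.endswith n "Query"
          || is_enum_model n models))) = F := by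
      rw [hF]
      apply List.filter_congr
      intro n _
      rw [Bool.not_or, Bool.not_or]
    rw [hpred]
  have hGpw : (pvGreedyW key S []).Pairwise (fun a b => pvKf a < pvKf b) :=
    hSpw.sublist (pvGreedyW_sublist key S [])
  have hGnd : (pvGreedyW key S []).Nodup :=
    hGpw.imp (fun h => fun he => absurd (he ▸ h) (lt_irrefl _))
  have hVnd := pv_values_nodup key F hFnd
  have hperm : (pvGreedyW key S []).Perm ((F.foldl (pvUpd key) PySem.Dict.empty).values) := by
    rw [List.perm_ext_iff_of_nodup hGnd hVnd]
    intro v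
    rw [pvGreedyW_mem key S hSpw [] v, pv_values_iff key F hFnd v, hS]
    simp only [PySem.List.mem_sorted, List.not_mem_nil, not_false_iff, true_and]
  have hW : PySem.List.sorted ((F.foldl (pvUpd key) PySem.Dict.empty).values) pvKf
      = pvGreedyW key S [] :=
    PySem.List.sorted_eq_of_perm_of_pairwise_lt _ _ pvKf hperm hGpw
  have hBmap : ((PySem.List.sorted ((F.foldl (pvUpd key) PySem.Dict.empty).values) pvKf).foldl
          (fun (d : PySem.Dict String String) w => d.insert (w ++ "Dict") (key w))
          PySem.Dict.empty).items
      = (pvGreedyW key S []).map (fun v => (v ++ "Dict", key v)) := by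
    rw [hW]
    have := PySem.Dict.items_foldl_insert_fresh (pvGreedyW key S [])
      (fun w => w ++ "Dict") (fun w => key w) PySem.Dict.empty
      (fun a _ => PySem.Dict.contains_empty _)
      (List.Nodup.map (fun a b h => pv_append_dict_inj a b h) hGnd)
    simpa using this
  rw [hA, hB, hBmap]
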